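-- pv_equiv track=rewrite | github.com/trace86/jhu-aai | AlphaToe/mapping.py | horizontal_left_search
-- ===== SOURCE A (Python) =====
-- from typing import List, Tuple
--
-- def horizontal_left_search(i: int, j: int, matrix: List[List[int]], num_neighbors: int, symbol: int) -> bool:
--     min_i = 0
--     min_j = 0
--     max_i = len(matrix) - 1
--     max_j = len(matrix[0]) - 1
--
--     xs = []
--     for n in range(1, num_neighbors + 1):
--         _i = i
--         _j = j - n
--         if _i >= min_i and _j >= min_j and _i <= max_i and _j <= max_j:
--             xs.append(matrix[_i][_j])
--     if len(xs) != num_neighbors: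
--         return False
--     return all(item == symbol for item in xs)
-- ===== SOURCE B (Python) =====
-- def horizontal_left_search(i, j, matrix, num_neighbors, symbol):
--     width = len(matrix[0])
--     if num_neighbors < 0:
--         return False
--     if num_neighbors == 0:
--         return True
--     if not (0 <= i < len(matrix) and num_neighbors <= j <= width):
--         return False
--     return matrix[i][j - num_neighbors:j] == [symbol] * num_neighbors
-- ===== Notes on version B (the rewrite author's own statement) =====
-- stated objective: simpler
-- what changed: B has no element loop at all: after a closed-form arithmetic bounds guard it extracts the whole left window with one slice and compares it against a replicated [symbol]*num_neighbors list, instead of A's per-cell bounds-filtered accumulation loop with a length-as-bounds-proxy check followed by an all() scan.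
import Mathlib
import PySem

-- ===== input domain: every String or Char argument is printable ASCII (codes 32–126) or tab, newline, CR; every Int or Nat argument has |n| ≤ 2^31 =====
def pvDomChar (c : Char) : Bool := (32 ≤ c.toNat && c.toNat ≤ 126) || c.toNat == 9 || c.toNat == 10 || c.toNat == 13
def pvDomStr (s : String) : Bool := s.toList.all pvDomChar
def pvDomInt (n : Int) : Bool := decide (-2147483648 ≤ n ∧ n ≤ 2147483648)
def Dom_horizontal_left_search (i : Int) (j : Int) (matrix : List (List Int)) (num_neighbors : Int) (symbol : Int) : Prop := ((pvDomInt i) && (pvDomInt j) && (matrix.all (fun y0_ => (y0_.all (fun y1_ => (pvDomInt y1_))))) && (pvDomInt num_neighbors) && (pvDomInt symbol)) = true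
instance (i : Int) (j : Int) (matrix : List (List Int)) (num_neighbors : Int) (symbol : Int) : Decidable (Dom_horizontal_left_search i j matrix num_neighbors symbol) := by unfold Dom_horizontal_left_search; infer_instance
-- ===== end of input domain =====

-- B replaces A's per-cell bounds-filtered accumulation loop by an arithmetic bounds guard, one slice and a comparison with a replicated list (objective: simpler).

-- ===== PORT A =====
def horizontal_left_search (i : Int) (j : Int) (matrix : List (List Int)) (num_neighbors : Int) (symbol : Int) : Bool :=
  let min_i : Int := 0
  let min_j : Int := 0
  let max_i : Int := (matrix.length : Int) - 1
  let max_j : Int := ((matrix.headD []).length : Int) - 1   -- len(matrix[0]); Pre_ excludes the empty matrix, where Python raises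
  let xs : List Int := (PySem.List.pyRange 1 (num_neighbors + 1) 1).foldl (fun acc n =>
    let _i := i
    let _j := j - n
    if _i ≥ min_i ∧ _j ≥ min_j ∧ _i ≤ max_i ∧ _j ≤ max_j then
      acc ++ [PySem.List.pyGetD (PySem.List.pyGetD matrix _i []) _j 0]
    else acc) []
  if (xs.length : Int) ≠ num_neighbors then false
  else xs.all (fun item => item == symbol)

-- ===== PORT B =====
def horizontal_left_search_alt (i : Int) (j : Int) (matrix : List (List Int)) (num_neighbors : Int) (symbol : Int) : Bool :=
  let width : Int := ((matrix.headD []).length : Int)      -- len(matrix[0]); Pre_ excludes the empty matrix, where Python raises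
  if num_neighbors < 0 then false
  else if num_neighbors == 0 then true
  else if ¬ (0 ≤ i ∧ i < (matrix.length : Int) ∧ num_neighbors ≤ j ∧ j ≤ width) then false
  else PySem.List.slice (PySem.List.pyGetD matrix i []) (some (j - num_neighbors)) (some j)
         == List.replicate num_neighbors.toNat symbol

-- ===== PRECONDITION & SPEC =====
-- Pre_ excludes exactly the inputs on which Python A raises IndexError: the empty matrix
-- (matrix[0]), and ragged matrices where some access A performs hits a row i shorter than row 0.
def Pre_horizontal_left_search (i : Int) (j : Int) (matrix : List (List Int)) (num_neighbors : Int) (symbol : Int) : Prop :=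
  matrix ≠ [] ∧
  ((0 ≤ i ∧ i < (matrix.length : Int) ∧ 1 ≤ num_neighbors ∧ 1 ≤ j ∧
      j - num_neighbors ≤ ((matrix.headD []).length : Int) - 1) →
    min (j - 1) (((matrix.headD []).length : Int) - 1) < (((matrix.getD i.toNat []).length : Int)))
instance (i : Int) (j : Int) (matrix : List (List Int)) (num_neighbors : Int) (symbol : Int) : Decidable (Pre_horizontal_left_search i j matrix num_neighbors symbol) := by unfold Pre_horizontal_left_search; infer_instance

def pvWitness_horizontal_left_search : Int × Int × List (List Int) × Int × Int := (0, 2, [[1, 1, 1]], 2, 1)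

def Spec_horizontal_left_search (i : Int) (j : Int) (matrix : List (List Int)) (num_neighbors : Int) (symbol : Int) (out : Bool) : Prop := out = horizontal_left_search_alt i j matrix num_neighbors symbol
instance (i : Int) (j : Int) (matrix : List (List Int)) (num_neighbors : Int) (symbol : Int) (out : Bool) : Decidable (Spec_horizontal_left_search i j matrix num_neighbors symbol out) := by unfold Spec_horizontal_left_search; infer_instance

-- ===== CLAIM (what is proved, stated in full; the proofs are below) =====
def Claim_equal_horizontal_left_search : Prop := ∀ (i : Int) (j : Int) (matrix : List (List Int)) (num_neighbors : Int) (symbol : Int), Dom_horizontal_left_search i j matrix num_neighbors symbol → Pre_horizontal_left_search i j matrix num_neighbors symbol → Spec_horizontal_left_search i j matrix num_neighbors symbol (horizontal_left_search i j matrix num_neighbors symbol)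

-- ===== LEMMAS AND PROOFS =====

-- a drop/take segment equals a replicate iff every element of the segment is that value
theorem seg_eq_replicate_iff (row : List Int) (a m : Nat) (s : Int) (h : a + m ≤ row.length) :
    ((row.drop a).take m = List.replicate m s) ↔ ∀ k < m, row.getD (a + k) 0 = s := by
  constructor
  · intro he k hk
    have hlen : ((row.drop a).take m).length = m := by simp; omega
    have h2 : ((row.drop a).take m)[k]'(by omega) = s := by
      simp only [he, List.getElem_replicate]
    rw [List.getElem_take, List.getElem_drop] at h2
    rw [List.getD_eq_getElem?_getD, List.getElem?_eq_getElem (by omega)]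
    simpa using h2
  · intro hall
    apply List.ext_getElem
    · simp; omega
    · intro k hk1 hk2
      simp only [List.length_replicate] at hk2
      rw [List.getElem_take, List.getElem_drop, List.getElem_replicate]
      have := hall k hk2
      rwa [List.getD_eq_getElem?_getD, List.getElem?_eq_getElem (by omega)] at this
    
theorem hls_main (i j : Int) (matrix : List (List Int)) (num_neighbors symbol : Int)
    (hpre : Pre_horizontal_left_search i j matrix num_neighbors symbol) :
    horizontal_left_search i j matrix num_neighbors symbol
      = horizontal_left_search_alt i j matrix num_neighbors symbol := by
  obtain ⟨hne, hrag⟩ := hpre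
  simp only [horizontal_left_search, horizontal_left_search_alt]
  set width : Int := ((matrix.headD []).length : Int) with hw
  set max_i : Int := (matrix.length : Int) - 1 with hmi
  set val : Int → Int := fun n => PySem.List.pyGetD (PySem.List.pyGetD matrix i []) (j - n) 0 with hval
  rw [PySem.List.foldl_append_ite]
  by_cases hneg : num_neighbors < 0
  · rw [PySem.List.pyRange_one_eq_nil (by omega)]
    simp only [List.filter_nil, List.map_nil, List.nil_append, List.length_nil]
    rw [if_pos (by omega), if_pos (by omega)]
  · by_cases h0 : num_neighbors = 0
    · subst h0
      rw [PySem.List.pyRange_one_eq_nil (by omega)]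
      simp
    · -- num_neighbors ≥ 1
      have hnn1 : 1 ≤ num_neighbors := by omega
      rw [if_neg (show ¬ (num_neighbors < 0) from by omega),
          if_neg (show ¬ ((num_neighbors == 0) = true) from by simp [h0])]
      set R := PySem.List.pyRange 1 (num_neighbors + 1) 1 with hR
      have hRlen : R.length = num_neighbors.toNat := by
        rw [hR, PySem.List.length_pyRange_one]; omega
      by_cases hC : 0 ≤ i ∧ i < (matrix.length : Int) ∧ num_neighbors ≤ j ∧ j ≤ width
      · -- bounds hold: A keeps every cell; B compares the slice with a replicate
        have hall : ∀ n ∈ R, decide (i ≥ 0 ∧ j - n ≥ 0 ∧ i ≤ max_i ∧ j - n ≤ width - 1) = true := by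
          intro n hn
          rw [hR, PySem.List.mem_pyRange_one] at hn
          simp only [decide_eq_true_eq]
          exact ⟨hC.1, by omega, by omega, by omega⟩
        rw [List.filter_eq_self.mpr hall]
        rw [if_neg (show ¬ ((((([] : List Int) ++ R.map val).length : Int)) ≠ num_neighbors) by
          simp only [List.nil_append, List.length_map, hRlen]; omega)]
        rw [if_neg (not_not_intro hC)]
        -- both sides are now about row i
        set row : List Int := PySem.List.pyGetD matrix i [] with hrowd
        have hrow : row = matrix.getD i.toNat [] := by
          rw [hrowd, PySem.List.pyGetD_eq_getElem matrix [] hC.1 (by exact_mod_cast hC.2.1)]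
          rw [List.getD_eq_getElem?_getD, List.getElem?_eq_getElem (by omega)]
          rfl
        have hjrow : j ≤ (row.length : Int) := by
          have := hrag ⟨hC.1, hC.2.1, hnn1, by omega, by omega⟩
          rw [hrow]; omega
        have hslice : PySem.List.slice row (some (j - num_neighbors)) (some j)
            = (row.drop (j - num_neighbors).toNat).take num_neighbors.toNat := by
          rw [PySem.List.slice_toNat row (by omega) (by omega)]
          congr 1; omega
        rw [hslice]
        have hseg := seg_eq_replicate_iff row (j - num_neighbors).toNat num_neighbors.toNat symbol (by omega)
        rcases Bool.eq_false_or_eq_true ((row.drop (j - num_neighbors).toNat).take num_neighbors.toNat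
            == List.replicate num_neighbors.toNat symbol) with hb | hb
        · -- the segment is all symbol: A's all() is true too
          rw [hb]
          simp only [beq_iff_eq] at hb
          have hfor := hseg.mp hb
          simp only [List.nil_append, List.all_map, List.all_eq_true, Function.comp]
          intro n hn
          rw [hR, PySem.List.mem_pyRange_one] at hn
          simp only [beq_iff_eq]
          have := hfor (num_neighbors - n).toNat (by omega)
          rw [show ((j - num_neighbors).toNat + (num_neighbors - n).toNat : Nat) = ((j - n).toNat : Nat) by omega] at this
          rw [show j - n = (((j - n).toNat : Nat) : Int) by omega]
          rwa [PySem.List.pyGetD_natCast]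
        · -- the segment has an element ≠ symbol: A's all() is false too
          rw [hb]
          simp only [beq_eq_false_iff_ne, ne_eq] at hb
          have hnot := (not_iff_not.mpr hseg).mp hb
          push Not at hnot
          obtain ⟨k, hk, hks⟩ := hnot
          simp only [List.nil_append]
          rw [List.all_eq_false]
          refine ⟨val (num_neighbors - (k : Int)), List.mem_map_of_mem
            (by rw [hR, PySem.List.mem_pyRange_one]; omega), ?_⟩
          simp only [hval, beq_iff_eq]
          rw [show j - (num_neighbors - (k : Int)) = ((j - num_neighbors).toNat + k : Nat) by omega,
            PySem.List.pyGetD_natCast]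
          simpa using hks
      · -- bounds fail: A's filtered list is too short, B's guard fires
        have hex : ∃ n ∈ R, ¬ ((i ≥ 0 ∧ j - n ≥ 0 ∧ i ≤ max_i ∧ j - n ≤ width - 1)) := by
          by_cases hji : num_neighbors ≤ j
          · refine ⟨1, by rw [hR, PySem.List.mem_pyRange_one]; omega, ?_⟩
            intro ⟨h1, h2, h3, h4⟩
            exact hC ⟨h1, by omega, hji, by omega⟩
          · exact ⟨num_neighbors, by rw [hR, PySem.List.mem_pyRange_one]; omega,
              fun h => hji (by omega)⟩
        have hfl : (R.filter (fun n => decide (i ≥ 0 ∧ j - n ≥ 0 ∧ i ≤ max_i ∧ j - n ≤ width - 1))).length < R.length :=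
          List.length_filter_lt_length_iff_exists.mpr (by
            obtain ⟨n, hn, hpn⟩ := hex
            exact ⟨n, hn, by simpa using hpn⟩)
        rw [if_pos (show (((([] : List Int) ++ (R.filter (fun x => decide (i ≥ 0 ∧ j - x ≥ 0 ∧ i ≤ max_i ∧ j - x ≤ width - 1))).map val).length : Int)) ≠ num_neighbors by
          simp only [List.nil_append, List.length_map]
          rw [hRlen] at hfl
          omega)]
        rw [if_pos hC]

-- ===== VERDICT (by name: the statement is the Claim_ definition above) =====
theorem horizontal_left_search_spec : Claim_equal_horizontal_left_search := by
  intro i j matrix nn s _ hpre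
  exact hls_main i j matrix nn s hpre
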